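-- pv_equiv track=rewrite | github.com/Conut-1/Python_Learning | 백준/문제/Gold/16974. 레벨 햄버거.py | calculate
-- ===== SOURCE A (Python) =====
-- def calculate(n, x):
--     if x == 0:
--         return 0
--     if x >= 2 ** (n + 2) - 3:
--         return 2 ** (n + 1) - 1
--     sum = calculate(n - 1, x - 1)
--     if x > 2 ** (n + 1) - 2:
--         sum += 1
--     if x > 2 ** (n + 1) - 1:
--         sum += calculate(n - 1, x - 2 ** (n + 1) + 1)
--     return sum
-- ===== SOURCE B (Python) =====
-- def calculate(n, x):
--     total = 0
--     while n > 0: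
--         if x <= 0:
--             return total
--         L = x.bit_length()
--         if L <= n:
--             # x < 2**L <= 2**n: the next n-L+1 levels all descend through the
--             # leading bun, so take them in one jump (no big powers needed).
--             d = n - L + 1
--             if x <= d:
--                 return total
--             x -= d
--             n -= d
--             continue
--         if x >= 2 ** (n + 2) - 3:
--             return total + 2 ** (n + 1) - 1
--         if x <= 2 ** (n + 1) - 2:
--             x -= 1
--         else:
--             total += 2 ** n
--             x -= 2 ** (n + 1) - 1
--         n -= 1
--     return total + (1 if x >= 1 else 0)
-- ===== Notes on version B (the rewrite author's own statement) =====
-- stated objective: faster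
-- what changed: Replaced A's recursive descent by an iterative loop that skips each run of leading buns in a single bit_length-based jump, so it never recurses and never computes the huge powers 2**n that A evaluates at every high level.
-- outside the precondition, e.g. on calculate(-1, 5): A returns 0, B returns 1; on calculate(-2, 3): A returns -0.5, B returns 1; on calculate(2, -1): A does not finish within the time limit, B returns 0
import Mathlib
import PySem

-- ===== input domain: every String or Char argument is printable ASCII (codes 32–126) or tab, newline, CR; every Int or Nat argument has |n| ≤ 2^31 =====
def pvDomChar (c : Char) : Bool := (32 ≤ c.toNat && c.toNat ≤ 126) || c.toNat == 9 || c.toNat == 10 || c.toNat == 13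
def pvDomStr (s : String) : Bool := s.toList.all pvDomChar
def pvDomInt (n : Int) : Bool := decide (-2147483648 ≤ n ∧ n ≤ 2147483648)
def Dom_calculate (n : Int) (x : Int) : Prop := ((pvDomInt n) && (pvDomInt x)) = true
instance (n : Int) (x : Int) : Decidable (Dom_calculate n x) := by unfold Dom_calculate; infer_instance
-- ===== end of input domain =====

-- B replaces A's recursive descent by an iterative loop that skips each run of leading buns
-- in one bit_length-based jump, so it never computes the huge powers A computes at high levels.

-- ===== PORT A =====
-- A recurses with n decreasing by 1; inside Pre_ (n ≥ 0, x ≥ 0) the depth is at most n+1,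
-- so fuel n.toNat + 1 is exact there (outside Pre_ the Python diverges or returns floats).
def calcA : Nat → Int → Int → Int
  | 0, _, _ => 0
  | f + 1, n, x =>
    if x = 0 then 0
    else if x ≥ 2 ^ (n + 2).toNat - 3 then 2 ^ (n + 1).toNat - 1
    else
      let s := calcA f (n - 1) (x - 1)
      let s := if x > 2 ^ (n + 1).toNat - 2 then s + 1 else s
      let s := if x > 2 ^ (n + 1).toNat - 1 then s + calcA f (n - 1) (x - 2 ^ (n + 1).toNat + 1) else s
      s

def calculate (n : Int) (x : Int) : Int := calcA (n.toNat + 1) n x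

-- ===== PORT B =====
-- B's 'while n > 0' loop; every iteration decreases n by at least 1, so fuel n.toNat suffices
-- (the fuel-0 body is the loop-exit expression, reached exactly when n ≤ 0).
-- Python's x.bit_length() for x ≥ 1 is Nat.size of x.
def calcB : Nat → Int → Int → Int → Int
  | 0, _, x, total => total + (if x ≥ 1 then 1 else 0)
  | f + 1, n, x, total =>
    if n ≤ 0 then total + (if x ≥ 1 then 1 else 0)
    else if x ≤ 0 then total
    else
      let L : Int := (x.toNat.size : Int)
      if L ≤ n then
        let d := n - L + 1
        if x ≤ d then total
        else calcB f (n - d) (x - d) total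
      else
        if x ≥ 2 ^ (n + 2).toNat - 3 then total + 2 ^ (n + 1).toNat - 1
        else if x ≤ 2 ^ (n + 1).toNat - 2 then calcB f (n - 1) (x - 1) total
        else calcB f (n - 1) (x - (2 ^ (n + 1).toNat - 1)) (total + 2 ^ n.toNat)

def calculate_alt (n : Int) (x : Int) : Int := calcB n.toNat n x 0

-- ===== PRECONDITION & SPEC =====
-- Pre_ restricts to the problem's natural domain (burger level n ≥ 0, prefix length x ≥ 0):
-- outside it A diverges (negative x) or returns Python floats (n ≤ -2), except the degenerate
-- level n = -1 where A's integer 0 is an accident of its implementation.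
def Pre_calculate (n : Int) (x : Int) : Prop := 0 ≤ n ∧ 0 ≤ x
instance (n : Int) (x : Int) : Decidable (Pre_calculate n x) := by unfold Pre_calculate; infer_instance
def pvWitness_calculate : Int × Int := (3, 17)

def Spec_calculate (n : Int) (x : Int) (out : Int) : Prop := out = calculate_alt n x
instance (n : Int) (x : Int) (out : Int) : Decidable (Spec_calculate n x out) := by unfold Spec_calculate; infer_instance

-- ===== CLAIM (what is proved, stated in full; the proofs are below) =====
def Claim_equal_calculate : Prop := ∀ (n : Int) (x : Int), Dom_calculate n x → Pre_calculate n x → Spec_calculate n x (calculate n x)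

-- ===== LEMMAS AND PROOFS =====

lemma two_pow_ge (k : Nat) : (1 : Int) ≤ 2 ^ k := one_le_pow₀ (by norm_num)

lemma two_pow_mono {a b : Nat} (h : a ≤ b) : (2 : Int) ^ a ≤ 2 ^ b :=
  pow_le_pow_right₀ (by norm_num) h

-- one-step unfolding of A's recursion with the lets resolved
lemma calcA_succ (f : Nat) (n x : Int) : calcA (f + 1) n x =
    if x = 0 then 0
    else if x ≥ 2 ^ (n + 2).toNat - 3 then 2 ^ (n + 1).toNat - 1
    else
      if x > 2 ^ (n + 1).toNat - 1 then
        (if x > 2 ^ (n + 1).toNat - 2 then calcA f (n - 1) (x - 1) + 1 else calcA f (n - 1) (x - 1))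
          + calcA f (n - 1) (x - 2 ^ (n + 1).toNat + 1)
      else
        (if x > 2 ^ (n + 1).toNat - 2 then calcA f (n - 1) (x - 1) + 1 else calcA f (n - 1) (x - 1)) := rfl

-- A at level 0 with x ≥ 0: a single patty
lemma calcA_lvl0 (f : Nat) (x : Int) (hx : 0 ≤ x) :
    calcA (f + 1) 0 x = (if x ≥ 1 then 1 else 0) := by
  rw [calcA_succ]
  have h2 : ((0 : Int) + 2).toNat = 2 := by decide
  have h1 : ((0 : Int) + 1).toNat = 1 := by decide
  rw [h2, h1]
  rcases lt_or_ge x 1 with h | h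
  · have : x = 0 := by omega
    simp [this]
  · have hx0 : ¬ x = 0 := by omega
    have hsat : x ≥ 2 ^ 2 - 3 := by norm_num; omega
    simp [hx0, h]

-- an all-bun prefix counts no patties: j descent steps exhaust x
lemma calcA_zero (j : Nat) : ∀ (k : Nat) (x : Int), 0 ≤ x → x ≤ (j : Int) →
    x ≤ 2 ^ (k + 1) - 1 → calcA (k + j + 1) ((k : Int) + (j : Int)) x = 0 := by
  induction j with
  | zero =>
    intro k x hx0 hxj _
    have hx : x = 0 := by omega
    rw [hx]
    rw [show k + 0 + 1 = k + 1 from rfl, calcA_succ]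
    simp
  | succ j ih =>
    intro k x hx0 hxj hxb
    by_cases hx : x = 0
    · rw [hx, show k + (j + 1) + 1 = (k + j + 1) + 1 from rfl, calcA_succ]; simp
    · have hx1 : 1 ≤ x := by omega
      have hn2 : (((k : Int) + (j + 1 : Nat)) + 2).toNat = k + j + 3 := by push_cast; omega
      have hn1 : (((k : Int) + (j + 1 : Nat)) + 1).toNat = k + j + 2 := by push_cast; omega
      have e1 : (2 : Int) ^ (k + 1) = 2 * 2 ^ k := by ring
      have hm1 : 4 * (2 : Int) ^ k ≤ 2 ^ (k + j + 2) := by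
        calc (4 : Int) * 2 ^ k = 2 ^ (k + 2) := by ring
          _ ≤ _ := two_pow_mono (by omega)
      have hm2 : 8 * (2 : Int) ^ k ≤ 2 ^ (k + j + 3) := by
        calc (8 : Int) * 2 ^ k = 2 ^ (k + 3) := by ring
          _ ≤ _ := two_pow_mono (by omega)
      have hp : (1 : Int) ≤ 2 ^ k := two_pow_ge _
      rw [e1] at hxb
      rw [show k + (j + 1) + 1 = (k + j + 1) + 1 from rfl, calcA_succ, hn2, hn1]
      have hnsat : ¬ x ≥ 2 ^ (k + j + 3) - 3 := by omega
      have hna : ¬ x > 2 ^ (k + j + 2) - 2 := by omega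
      have hnb : ¬ x > 2 ^ (k + j + 2) - 1 := by omega
      simp only [hx, hnsat, hna, hnb, if_false]
      have hlvl : ((k : Int) + (j + 1 : Nat)) - 1 = (k : Int) + (j : Int) := by push_cast; ring
      rw [hlvl]
      exact ih k (x - 1) (by omega) (by omega) (by omega)

-- d consecutive bun-descent steps of A collapse to a single jump
lemma calcA_descend (d : Nat) : ∀ (k : Nat) (x : Int), 1 ≤ x - (d : Int) →
    x ≤ 2 ^ (k + 1) - 1 →
    calcA (k + d + 1) ((k : Int) + (d : Int)) x = calcA (k + 1) (k : Int) (x - (d : Int)) := by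
  induction d with
  | zero => intro k x _ _; norm_num
  | succ d ih =>
    intro k x hx hxb
    have hx1 : 1 ≤ x := by omega
    have hn2 : (((k : Int) + (d + 1 : Nat)) + 2).toNat = k + d + 3 := by push_cast; omega
    have hn1 : (((k : Int) + (d + 1 : Nat)) + 1).toNat = k + d + 2 := by push_cast; omega
    have e1 : (2 : Int) ^ (k + 1) = 2 * 2 ^ k := by ring
    have hm1 : 4 * (2 : Int) ^ k ≤ 2 ^ (k + d + 2) := by
      calc (4 : Int) * 2 ^ k = 2 ^ (k + 2) := by ring
        _ ≤ _ := two_pow_mono (by omega)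
    have hm2 : 8 * (2 : Int) ^ k ≤ 2 ^ (k + d + 3) := by
      calc (8 : Int) * 2 ^ k = 2 ^ (k + 3) := by ring
        _ ≤ _ := two_pow_mono (by omega)
    have hp : (1 : Int) ≤ 2 ^ k := two_pow_ge _
    rw [e1] at hxb
    rw [show k + (d + 1) + 1 = (k + d + 1) + 1 from rfl, calcA_succ, hn2, hn1]
    have hx0 : ¬ x = 0 := by omega
    have hnsat : ¬ x ≥ 2 ^ (k + d + 3) - 3 := by omega
    have hna : ¬ x > 2 ^ (k + d + 2) - 2 := by omega
    have hnb : ¬ x > 2 ^ (k + d + 2) - 1 := by omega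
    simp only [hx0, hnsat, hna, hnb, if_false]
    have hlvl : ((k : Int) + (d + 1 : Nat)) - 1 = (k : Int) + (d : Int) := by push_cast; ring
    rw [hlvl, ih k (x - 1) (by push_cast at hx ⊢; omega) (by omega)]
    congr 1
    push_cast
    ring

-- Loop invariant: with enough fuel, B's loop at level k computes total + A's value.
lemma calcB_eq (f : Nat) : ∀ (k : Nat) (x total : Int), k ≤ f → 0 ≤ x →
    calcB f (k : Int) x total = total + calcA (k + 1) (k : Int) x := by
  induction f with
  | zero =>
    intro k x total hk hx
    have hk0 : k = 0 := by omega
    subst hk0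
    rw [show calcB 0 ((0:Nat) : Int) x total = total + (if x ≥ 1 then 1 else 0) from rfl]
    rw [show ((0:Nat) : Int) = (0 : Int) from rfl, calcA_lvl0 0 x hx]
  | succ f ih =>
    intro k x total hk hx
    rcases Nat.eq_zero_or_pos k with hk0 | hkpos
    · subst hk0
      simp only [Nat.cast_zero]
      rw [calcA_lvl0 0 x hx]
      simp only [calcB]
      rw [if_pos (by norm_num : (0 : Int) ≤ 0)]
    · obtain ⟨j, rfl⟩ : ∃ j, k = j + 1 := ⟨k - 1, by omega⟩
      have hnle : ¬ ((j + 1 : Nat) : Int) ≤ 0 := by push_cast; omega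
      rw [show calcB (f + 1) ((j + 1 : Nat) : Int) x total =
          (if ((j + 1 : Nat) : Int) ≤ 0 then total + (if x ≥ 1 then 1 else 0)
           else if x ≤ 0 then total
           else
             if ((x.toNat.size : Nat) : Int) ≤ ((j + 1 : Nat) : Int) then
               (if x ≤ ((j + 1 : Nat) : Int) - ((x.toNat.size : Nat) : Int) + 1 then total
                else calcB f (((j + 1 : Nat) : Int) - (((j + 1 : Nat) : Int) - ((x.toNat.size : Nat) : Int) + 1))
                       (x - (((j + 1 : Nat) : Int) - ((x.toNat.size : Nat) : Int) + 1)) total)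
             else
               if x ≥ 2 ^ (((j + 1 : Nat) : Int) + 2).toNat - 3 then total + 2 ^ (((j + 1 : Nat) : Int) + 1).toNat - 1
               else if x ≤ 2 ^ (((j + 1 : Nat) : Int) + 1).toNat - 2 then calcB f (((j + 1 : Nat) : Int) - 1) (x - 1) total
               else calcB f (((j + 1 : Nat) : Int) - 1) (x - (2 ^ (((j + 1 : Nat) : Int) + 1).toNat - 1))
                      (total + 2 ^ ((j + 1 : Nat) : Int).toNat)) from rfl]
      rw [if_neg hnle]
      by_cases hx0 : x ≤ 0
      · have hxe : x = 0 := by omega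
        rw [if_pos hx0, hxe, show (j + 1) + 1 = (j + 1) + 1 from rfl, calcA_succ]
        simp
      · rw [if_neg hx0]
        have hx1 : 1 ≤ x := by omega
        set L := x.toNat.size with hL
        have hLpos : 1 ≤ L := by
          have : x.toNat ≠ 0 := by omega
          exact Nat.size_pos.mpr (Nat.pos_of_ne_zero this)
        have hxltL : x < 2 ^ L := by
          have h1 : x.toNat < 2 ^ L := Nat.lt_size_self _
          have h2 : ((x.toNat : Int)) = x := by omega
          calc x = (x.toNat : Int) := h2.symm
            _ < ((2 ^ L : Nat) : Int) := by exact_mod_cast h1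
            _ = 2 ^ L := by push_cast; ring
        by_cases hjump : ((L : Nat) : Int) ≤ ((j + 1 : Nat) : Int)
        · -- bun-run jump: L ≤ j + 1
          have hLle : L ≤ j + 1 := by exact_mod_cast hjump
          rw [if_pos hjump]
          set dN : Nat := j + 1 - L + 1 with hdN
          have hdcast : ((j + 1 : Nat) : Int) - ((L : Nat) : Int) + 1 = (dN : Int) := by push_cast; omega
          rw [hdcast]
          have hlev : (L - 1) + dN = j + 1 := by omega
          have hxb : x ≤ 2 ^ ((L - 1) + 1) - 1 := by
            have : (L - 1) + 1 = L := by omega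
            rw [this]; omega
          by_cases hxd : x ≤ (dN : Int)
          · rw [if_pos hxd]
            have h0 := calcA_zero dN (L - 1) x hx hxd hxb
            rw [show ((L - 1 : Nat) : Int) + (dN : Int) = ((j + 1 : Nat) : Int) from by push_cast; omega] at h0
            rw [show (L - 1) + dN + 1 = (j + 1) + 1 from by omega] at h0
            rw [h0]; ring
          · rw [if_neg hxd]
            have hdesc := calcA_descend dN (L - 1) x (by omega) hxb
            rw [show ((L - 1 : Nat) : Int) + (dN : Int) = ((j + 1 : Nat) : Int) from by push_cast; omega] at hdesc
            rw [show (L - 1) + dN + 1 = (j + 1) + 1 from by omega] at hdesc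
            rw [hdesc]
            have hlve : ((j + 1 : Nat) : Int) - (dN : Int) = ((L - 1 : Nat) : Int) := by push_cast; omega
            rw [hlve]
            rw [ih (L - 1) (x - dN) total (by omega) (by omega)]
        · -- 2^j ≤ x: do one ordinary level with the power comparisons
          rw [if_neg hjump]
          have hn2 : (((j + 1 : Nat) : Int) + 2).toNat = j + 3 := by push_cast; omega
          have hn1 : (((j + 1 : Nat) : Int) + 1).toNat = j + 2 := by push_cast; omega
          have hnn : ((j + 1 : Nat) : Int).toNat = j + 1 := by push_cast; omega
          have hsub : ((j + 1 : Nat) : Int) - 1 = (j : Int) := by push_cast; ring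
          have hp1 : (1 : Int) ≤ 2 ^ j := two_pow_ge j
          have e3 : (2 : Int) ^ (j + 3) = 8 * 2 ^ j := by ring
          have e2 : (2 : Int) ^ (j + 2) = 4 * 2 ^ j := by ring
          have e1 : (2 : Int) ^ (j + 1) = 2 * 2 ^ j := by ring
          rw [hn2, hn1, hnn, hsub]
          rw [show (j + 1) + 1 = (j + 1) + 1 from rfl, calcA_succ, hn2, hn1, hsub]
          have hxne : ¬ x = 0 := by omega
          simp only [hxne, if_false]
          by_cases hsat : x ≥ 2 ^ (j + 3) - 3
          · simp only [hsat, if_true]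
            rw [show j + 1 + 1 = j + 2 from by omega]
            ring
          · rw [if_neg (by omega : ¬ x ≥ 2 ^ (j + 3) - 3),
                if_neg (by omega : ¬ 2 ^ (j + 3) - 3 ≤ x)]
            by_cases hlo : x ≤ 2 ^ (j + 2) - 2
            · have hna : ¬ x > 2 ^ (j + 2) - 2 := by omega
              have hnb : ¬ x > 2 ^ (j + 2) - 1 := by omega
              rw [if_pos hlo, if_neg (by omega : ¬ 2 ^ (j + 2) - 1 < x),
                  if_neg (by omega : ¬ 2 ^ (j + 2) - 2 < x)]
              exact ih j (x - 1) total (by omega) (by omega)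
            · -- right half: A's first recursive call saturates to 2^(j+1) - 1
              have hga : x > 2 ^ (j + 2) - 2 := by omega
              have hA1 : calcA (j + 1) (j : Int) (x - 1) = 2 ^ (j + 1) - 1 := by
                obtain ⟨j', rfl⟩ | hj0 : (∃ j', j = j' + 1) ∨ j = 0 := by
                  rcases Nat.eq_zero_or_pos j with h | h
                  · exact Or.inr h
                  · exact Or.inl ⟨j - 1, by omega⟩
                · rw [show j' + 1 + 2 = j' + 3 from by omega] at hga
                  have g4 : (4 : Int) ≤ 2 ^ (j' + 2) := by
                    calc (4 : Int) = 2 ^ 2 := by norm_num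
                      _ ≤ _ := two_pow_mono (by omega)
                  have g2 : (2 : Int) ^ (j' + 3) = 2 * 2 ^ (j' + 2) := by ring
                  rw [calcA_succ]
                  have hk2 : ((j' + 1 : Nat) : Int) + 2 = ((j' + 3 : Nat) : Int) := by push_cast; ring
                  have hk1 : ((j' + 1 : Nat) : Int) + 1 = ((j' + 2 : Nat) : Int) := by push_cast; ring
                  rw [hk2, hk1, Int.toNat_natCast, Int.toNat_natCast]
                  have hx1ne : ¬ (x - 1 = 0) := by omega
                  simp only [hx1ne, if_false, ge_iff_le]
                  rw [if_pos (by omega : 2 ^ (j' + 3) - 3 ≤ x - 1)]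
                · subst hj0
                  simp only [Nat.cast_zero]
                  rw [calcA_lvl0 0 (x - 1) (by omega)]
                  rw [if_pos (by omega : x - 1 ≥ 1)]
                  norm_num
              rw [if_neg hlo]
              by_cases hmid : x > 2 ^ (j + 2) - 1
              · rw [if_pos (by omega : 2 ^ (j + 2) - 1 < x), if_pos (by omega : 2 ^ (j + 2) - 2 < x), hA1]
                rw [ih j (x - (2 ^ (j + 2) - 1)) (total + 2 ^ (j + 1)) (by omega) (by omega)]
                have : x - 2 ^ (j + 2) + 1 = x - (2 ^ (j + 2) - 1) := by ring
                rw [this]; ring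
              · -- exactly at the middle patty: x = 2^(j+2) - 1
                have hxeq : x = 2 ^ (j + 2) - 1 := by omega
                rw [if_neg (by omega : ¬ 2 ^ (j + 2) - 1 < x), if_pos (by omega : 2 ^ (j + 2) - 2 < x), hA1]
                rw [ih j (x - (2 ^ (j + 2) - 1)) (total + 2 ^ (j + 1)) (by omega) (by omega)]
                have hz : x - (2 ^ (j + 2) - 1) = 0 := by omega
                rw [hz]
                have : calcA (j + 1) (j : Int) 0 = 0 := by
                  cases j <;> simp [calcA]
                rw [this]; ring

-- ===== VERDICT (by name: the statement is the Claim_ definition above) =====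
theorem calculate_spec : Claim_equal_calculate := by
  intro n x _ hpre
  obtain ⟨hn, hx⟩ := hpre
  unfold Spec_calculate calculate calculate_alt
  obtain ⟨k, rfl⟩ : ∃ k : Nat, n = (k : Int) := ⟨n.toNat, by omega⟩
  have hk : ((k : Int)).toNat = k := by omega
  rw [hk, calcB_eq k k x 0 le_rfl hx, zero_add]
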